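-- pv_equiv track=rewrite | github.com/2b3pro/Roam-Graph-API | scripts/roam_utils.py | markdown_table_to_roam
-- ===== SOURCE A (Python) =====
-- def markdown_table_to_roam(text: str) -> str:
--     """
--     Convert traditional markdown table to Roam Research table format.
--
--     Args:
--         text (str): Text in traditional markdown table format
--
--     Returns:
--         str: Text in Roam table format
--
--     Examples:
--         >>> text = '''| Header1 | Header2 |
--         ... |---------|----------|
--         ... | Row1Col1 | Row1Col2 |'''
--         >>> MarkdownConverter.markdown_table_to_roam(text)
--         '''- {{[[table]]}}
--             - Header1
--                 - Row1Col1
--             - Header2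
--                 - Row1Col2'''
--     """
--     if not isinstance(text, str):
--         raise ValueError("Input must be a string")
--
--     # Split into lines and clean up
--     lines = [line.strip() for line in text.split('\n')]
--
--     # Need at least header row and separator
--     if len(lines) < 2:
--         return ""
--
--     # Parse header row
--     header_row = lines[0]
--     if not header_row.startswith('|') or not header_row.endswith('|'):
--         return ""
--
--     # Extract headers
--     headers = [h.strip() for h in header_row.strip('|').split('|')]
--
--     # Skip separator row
--     data_rows = []
--     for line in lines[2:]:  # Skip header and separator rows
--         if line.startswith('|') and line.endswith('|'):
--             cells = [cell.strip() for cell in line.strip('|').split('|')]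
--             data_rows.append(cells)
--
--     # Build Roam table format
--     result = ['- {{[[table]]}}']
--
--     # Add headers with their corresponding data
--     for col_idx, header in enumerate(headers):
--         result.append(f'\t- {header}')
--         # Add data for this column
--         for row in data_rows:
--             if col_idx < len(row):
--                 result.append(f'\t\t- {row[col_idx]}')
--             else:
--                 result.append('\t\t- ')  # Empty cell
--
--     return '\n'.join(result)
-- ===== SOURCE B (Python) =====
-- def markdown_table_to_roam(text: str) -> str:
--     if not isinstance(text, str):
--         raise ValueError("Input must be a string")
--
--     lines = [line.strip() for line in text.split('\n')]
--     if len(lines) < 2: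
--         return ""
--
--     header_row = lines[0]
--     if not (header_row.startswith('|') and header_row.endswith('|')):
--         return ""
--
--     headers = [h.strip() for h in header_row.strip('|').split('|')]
--     n = len(headers)
--
--     # Streaming single pass: never store the table row-major; each bucket is the
--     # finished output block of one column, grown as rows arrive.
--     buckets = [['\t- ' + h] for h in headers]
--     for line in lines[2:]:
--         if line.startswith('|') and line.endswith('|'):
--             cells = [c.strip() for c in line.strip('|').split('|')]
--             padded = cells[:n] + [''] * (n - len(cells))
--             buckets = [bucket + ['\t\t- ' + cell]
--                        for bucket, cell in zip(buckets, padded)]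
--
--     out = ['- {{[[table]]}}']
--     for bucket in buckets:
--         out.extend(bucket)
--     return '\n'.join(out)
-- ===== Notes on version B (the rewrite author's own statement) =====
-- stated objective: alternative
-- what changed: B streams the data lines in one pass, formatting each row's cells immediately into per-column output buckets (pad-then-zip, no row-major table kept and no per-header rescans), then concatenates the buckets; A stores all rows and rescans the whole row list once per header with an in-loop bounds check.
import Mathlib
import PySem

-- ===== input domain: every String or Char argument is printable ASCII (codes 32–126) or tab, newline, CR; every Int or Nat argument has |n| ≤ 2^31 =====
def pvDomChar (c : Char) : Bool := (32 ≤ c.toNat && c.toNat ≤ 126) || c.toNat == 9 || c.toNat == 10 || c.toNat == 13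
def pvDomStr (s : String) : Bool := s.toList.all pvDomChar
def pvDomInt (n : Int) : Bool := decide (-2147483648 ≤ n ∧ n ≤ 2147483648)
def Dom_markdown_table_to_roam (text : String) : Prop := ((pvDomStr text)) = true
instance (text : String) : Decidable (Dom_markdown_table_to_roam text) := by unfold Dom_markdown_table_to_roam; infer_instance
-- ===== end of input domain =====

-- B streams the data lines in one pass, formatting each row's cells straight into
-- per-column output buckets (pad-then-zip; no row-major table, no per-header rescans),
-- then concatenates the buckets; same return value (objective: alternative).

-- shared by both Pythons verbatim: "[c.strip() for c in line.strip('|').split('|')]"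
def pvCells (line : String) : List String :=
  ((PySem.Str.split? (PySem.Str.stripChars line "|") "|").getD []).map PySem.Str.strip

-- shared by both Pythons verbatim: "[line.strip() for line in text.split('\n')]"
def pvLines (text : String) : List String :=
  ((PySem.Str.split? text "\n").getD []).map PySem.Str.strip

def pvIsRow (line : String) : Bool :=
  PySem.Str.startswith line "|" && PySem.Str.endswith line "|"

-- ===== PORT A =====
def markdown_table_to_roam (text : String) : String :=
  let lines := pvLines text
  if lines.length < 2 then "" else
  let header_row := lines.headD ""
  if !(pvIsRow header_row) then "" else
  let headers := pvCells header_row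
  let data_rows := (lines.drop 2).foldl
    (fun acc line => if pvIsRow line then acc ++ [pvCells line] else acc) []
  let result := (PySem.List.enumerate headers).foldl
    (fun res p =>
      let res := res ++ ["\t- " ++ p.2]
      data_rows.foldl
        (fun res row =>
          if p.1 < (row.length : Int) then res ++ ["\t\t- " ++ PySem.List.pyGetD row p.1 ""]
          else res ++ ["\t\t- "]) res)
    ["- {{[[table]]}}"]
  PySem.Str.join "\n" result

-- ===== PORT B =====
def markdown_table_to_roam_alt (text : String) : String :=
  let lines := pvLines text
  if lines.length < 2 then "" else
  let header_row := lines.headD ""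
  if !(pvIsRow header_row) then "" else
  let headers := pvCells header_row
  let n := headers.length
  -- buckets = [['\t- ' + h] for h in headers]
  let buckets := (lines.drop 2).foldl
    (fun buckets line =>
      if pvIsRow line then
        let cells := pvCells line
        -- padded = cells[:n] + [''] * (n - len(cells))
        let padded := cells.take n ++ List.replicate (n - cells.length) ""
        (buckets.zip padded).map (fun p => p.1 ++ ["\t\t- " ++ p.2])
      else buckets)
    (headers.map (fun h => ["\t- " ++ h]))
  -- out = ['- {{[[table]]}}']; for bucket in buckets: out.extend(bucket)
  PySem.Str.join "\n" (buckets.foldl (fun out bucket => out ++ bucket) ["- {{[[table]]}}"])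

-- ===== PRECONDITION & SPEC =====
def Spec_markdown_table_to_roam (text : String) (out : String) : Prop := out = markdown_table_to_roam_alt text
instance (text : String) (out : String) : Decidable (Spec_markdown_table_to_roam text out) := by unfold Spec_markdown_table_to_roam; infer_instance

-- ===== CLAIM =====
def Claim_equal_markdown_table_to_roam : Prop := ∀ (text : String), Dom_markdown_table_to_roam text → Spec_markdown_table_to_roam text (markdown_table_to_roam text)

-- ===== LEMMAS AND PROOFS =====

-- the line A emits for column i of a data row
def pvCellA (i : Int) (row : List String) : String :=
  if i < (row.length : Int) then "\t\t- " ++ PySem.List.pyGetD row i "" else "\t\t- "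

-- the bucket list B maintains, characterised per column
def pvBucketsOf (hs : List String) (rows : List (List String)) : List (List String) :=
  (PySem.List.enumerate hs).map (fun p => ("\t- " ++ p.2) :: rows.map (pvCellA p.1))

lemma pvBucketsOf_nil (hs : List String) :
    pvBucketsOf hs [] = hs.map (fun h => ["\t- " ++ h]) := by
  have key : ∀ (s : Int), (PySem.List.enumerate hs s).map (fun p => ["\t- " ++ p.2]) =
      hs.map (fun h => ["\t- " ++ h]) := by
    intro s
    induction hs generalizing s with
    | nil => simp [PySem.List.enumerate_nil]
    | cons h t ih => simp [PySem.List.enumerate_cons, ih]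
  unfold pvBucketsOf
  simpa using key 0

-- B's fold step on a table line appends exactly A's cell line to every bucket
lemma pvBuckets_step (hs : List String) (rows : List (List String)) (cells : List String) :
    ((pvBucketsOf hs rows).zip
        (cells.take hs.length ++ List.replicate (hs.length - cells.length) "")).map
      (fun p => p.1 ++ ["\t\t- " ++ p.2]) =
    pvBucketsOf hs (rows ++ [cells]) := by
  have hpad : (cells.take hs.length ++ List.replicate (hs.length - cells.length) "").length
      = hs.length := by
    simp [List.length_take]; omega
  apply List.ext_getElem
  · simp [pvBucketsOf, hpad, PySem.List.length_enumerate]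
  · intro i h1 h2
    have hi : i < hs.length := by
      simpa [pvBucketsOf, PySem.List.length_enumerate] using h2
    have hip : i < (cells.take hs.length ++ List.replicate (hs.length - cells.length) "").length := by
      omega
    have hcell : "\t\t- " ++ (cells.take hs.length ++ List.replicate (hs.length - cells.length) "")[i] =
        pvCellA ((0 : Int) + (i : Int)) cells := by
      by_cases hic : i < cells.length
      · have htl : i < (cells.take hs.length).length := by simp [List.length_take]; omega
        rw [List.getElem_append_left htl, List.getElem_take]
        simp [pvCellA, PySem.List.pyGetD_natCast, List.getD_eq_getElem?_getD,
          List.getElem?_eq_getElem hic]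
        exact fun h => absurd hic (by omega)
      · have htl : (cells.take hs.length).length ≤ i := by simp [List.length_take]; omega
        rw [List.getElem_append_right htl, List.getElem_replicate]
        simp [pvCellA]
        exact fun h => absurd h hic
    simp only [List.getElem_map, List.getElem_zip, pvBucketsOf,
      PySem.List.getElem_enumerate, List.map_append, List.map_cons, List.map_nil,
      List.cons_append]
    rw [hcell]

-- B's whole fold over the remaining lines, as an invariant on the buckets
lemma pvBuckets_fold (hs : List String) (ls : List String) :
    ∀ rows, ls.foldl
      (fun buckets line =>
        if pvIsRow line then
          ((buckets.zip ((pvCells line).take hs.length ++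
              List.replicate (hs.length - (pvCells line).length) "")).map
            (fun p => p.1 ++ ["\t\t- " ++ p.2]))
        else buckets) (pvBucketsOf hs rows) =
    pvBucketsOf hs (rows ++ (ls.filter pvIsRow).map pvCells) := by
  induction ls with
  | nil => intro rows; simp
  | cons a t ih =>
    intro rows
    by_cases ha : pvIsRow a
    · rw [List.foldl_cons, if_pos ha, pvBuckets_step, ih (rows ++ [pvCells a])]
      simp [ha]
    · rw [List.foldl_cons, if_neg (by simp [ha]), ih rows]
      simp [ha]

-- A's inner fold over the rows emits one cell line per row
lemma pvA_inner (data_rows : List (List String)) (i : Int) (res : List String) :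
    data_rows.foldl
      (fun res row =>
        if i < (row.length : Int) then res ++ ["\t\t- " ++ PySem.List.pyGetD row i ""]
        else res ++ ["\t\t- "]) res =
    res ++ data_rows.map (pvCellA i) := by
  have hif : (fun (res : List String) row =>
      if i < ((row : List String).length : Int) then res ++ ["\t\t- " ++ PySem.List.pyGetD row i ""]
      else res ++ ["\t\t- "]) =
      (fun res row => res ++ [pvCellA i row]) := by
    funext res row; unfold pvCellA; split_ifs <;> rfl
  rw [hif, PySem.List.foldl_append_singleton_eq_map]

set_option maxHeartbeats 800000 in
theorem markdown_table_to_roam_spec : Claim_equal_markdown_table_to_roam := by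
  intro text _
  show markdown_table_to_roam text = markdown_table_to_roam_alt text
  simp only [markdown_table_to_roam, markdown_table_to_roam_alt]
  split_ifs with h1 h2
  · rfl
  · rfl
  · set lines := pvLines text
    set headers := pvCells (lines.headD "")
    set data_rows := ((lines.drop 2).filter pvIsRow).map pvCells with hdr_def
    refine congrArg (PySem.Str.join "\n") ?_
    -- A side: nested folds become a flatMap of per-column blocks
    rw [PySem.List.foldl_append_if, List.nil_append, ← hdr_def]
    have hAstep : (fun (res : List String) (p : Int × String) =>
        data_rows.foldl
          (fun res row =>
            if p.1 < (row.length : Int) then res ++ ["\t\t- " ++ PySem.List.pyGetD row p.1 ""]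
            else res ++ ["\t\t- "]) (res ++ ["\t- " ++ p.2])) =
        (fun res p => res ++ (("\t- " ++ p.2) :: data_rows.map (pvCellA p.1))) := by
      funext res p
      rw [pvA_inner]
      simp
    rw [hAstep, PySem.List.foldl_append_eq_flatMap]
    -- B side: the bucket fold is pvBucketsOf, then flattening gives the same flatMap
    rw [← pvBucketsOf_nil headers]
    rw [pvBuckets_fold headers (lines.drop 2) []]
    rw [List.nil_append, ← hdr_def, PySem.List.foldl_append_eq_flatten]
    simp [pvBucketsOf, List.flatMap_def]
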